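-- pv_equiv track=rewrite | github.com/phishNetSIH/SSH2023 | web/api/functions.py | count_case_change
-- ===== SOURCE A (Python) =====
-- def count_case_change(input_string):
--     switch_count = 0
--     prev_case = None
--     for char in input_string:
--         if char.isalpha() and (char.isupper() == (not prev_case)):
--             switch_count += 1
--             prev_case = char.isupper() if char.isalpha() else None
--     return switch_count
-- ===== SOURCE B (Python) =====
-- def count_case_change(input_string):
--     # case-booleans of only the alphabetic characters
--     cases = [c.isupper() for c in input_string if c.isalpha()]
--     # drop leading lowercase (A only starts counting at the first uppercase)
--     i = 0
--     while i < len(cases) and not cases[i]: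
--         i += 1
--     if i == len(cases):
--         return 0
--     # count maximal same-case runs from the first uppercase on
--     count = 1
--     prev = True
--     for b in cases[i + 1:]:
--         if b != prev:
--             count += 1
--             prev = b
--     return count
-- ===== Notes on version B (the rewrite author's own statement) =====
-- stated objective: alternative
-- what changed: Replaces A's single stateful flip-detecting loop over characters (Option-typed prev_case with a truthiness test) by a filter/map pass extracting the case-booleans of the alphabetic characters followed by a run-counting scan from the first uppercase.
import Mathlib
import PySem

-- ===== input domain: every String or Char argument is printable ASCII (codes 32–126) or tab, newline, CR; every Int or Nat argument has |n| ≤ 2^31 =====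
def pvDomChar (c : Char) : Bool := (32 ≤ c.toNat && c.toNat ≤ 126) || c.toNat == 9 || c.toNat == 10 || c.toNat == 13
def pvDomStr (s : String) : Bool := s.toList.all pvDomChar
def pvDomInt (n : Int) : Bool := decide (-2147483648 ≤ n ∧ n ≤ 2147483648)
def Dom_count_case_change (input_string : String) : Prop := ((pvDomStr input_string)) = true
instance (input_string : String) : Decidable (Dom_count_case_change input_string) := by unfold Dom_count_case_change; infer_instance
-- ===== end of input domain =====

-- B replaces A's stateful flip-counting loop by a filter/map of case-booleans plus a
-- run-counting scan from the first uppercase (objective: alternative decomposition, same cost).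

-- ===== PORT A =====
-- loop body of A: state = (switch_count, prev_case); Python's 'not prev_case' is
-- truthiness on Optional[bool]: true exactly when prev_case is None or False.
def aStep (st : Int × Option Bool) (c : Char) : Int × Option Bool :=
  if PySem.Chars.isalpha c && (PySem.Chars.isupper c == !(st.2.getD false)) then
    (st.1 + 1, if PySem.Chars.isalpha c then some (PySem.Chars.isupper c) else none)
  else st

def count_case_change (input_string : String) : Int :=
  (input_string.toList.foldl aStep (0, none)).1

-- ===== PORT B =====
-- '[c.isupper() for c in input_string if c.isalpha()]'
def caseOf (c : Char) : Option Bool :=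
  if PySem.Chars.isalpha c then some (PySem.Chars.isupper c) else none

-- body of B's run-counting for-loop: state = (count, prev)
def altStep (st : Int × Bool) (b : Bool) : Int × Bool :=
  if b != st.2 then (st.1 + 1, b) else st

def count_case_change_alt (input_string : String) : Int :=
  let cases := input_string.toList.filterMap caseOf
  -- Source B's index-advancing while loop computes exactly dropWhile; 'cases[i+1:]' is its tail
  match cases.dropWhile (fun b => !b) with
  | [] => 0
  | _ :: tail => (tail.foldl altStep (1, true)).1

-- ===== PRECONDITION & SPEC =====
def Spec_count_case_change (input_string : String) (out : Int) : Prop := out = count_case_change_alt input_string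
instance (input_string : String) (out : Int) : Decidable (Spec_count_case_change input_string out) := by unfold Spec_count_case_change; infer_instance

-- ===== CLAIM (what is proved, stated in full; the proofs are below) =====
def Claim_equal_count_case_change : Prop := ∀ (input_string : String), Dom_count_case_change input_string → Spec_count_case_change input_string (count_case_change input_string)

-- ===== LEMMAS AND PROOFS =====

-- A's step seen on the case-boolean of an alphabetic character
def bStep (st : Int × Option Bool) (b : Bool) : Int × Option Bool :=
  if b == !(st.2.getD false) then (st.1 + 1, some b) else st

theorem foldA_eq_foldB (l : List Char) (st : Int × Option Bool) :
    l.foldl aStep st = (l.filterMap caseOf).foldl bStep st := by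
  induction l generalizing st with
  | nil => rfl
  | cons c t ih =>
      by_cases h : PySem.Chars.isalpha c = true
      · simp [List.foldl, aStep, bStep, caseOf, h, ih]
      · simp at h
        simp [List.foldl, aStep, caseOf, h, ih]

theorem foldB_none_eq_false (l : List Bool) (c : Int) :
    (l.foldl bStep (c, none)).1 = (l.foldl bStep (c, some false)).1 := by
  induction l generalizing c with
  | nil => rfl
  | cons b t ih =>
      cases b
      · simpa [List.foldl, bStep] using ih c
      · simp [List.foldl, bStep]

theorem foldB_some_eq_foldAlt (l : List Bool) (c : Int) (p : Bool) :
    (l.foldl bStep (c, some p)).1 = (l.foldl altStep (c, p)).1 := by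
  induction l generalizing c p with
  | nil => rfl
  | cons b t ih =>
      cases b <;> cases p <;> simp [List.foldl, bStep, altStep, ih]

theorem foldB_false_eq_runs (l : List Bool) (c : Int) :
    (l.foldl bStep (c, some false)).1 =
      (match l.dropWhile (fun b => !b) with
       | [] => c
       | _ :: tail => (tail.foldl altStep (c + 1, true)).1) := by
  induction l generalizing c with
  | nil => rfl
  | cons b t ih =>
      cases b
      · simpa [List.foldl, bStep, List.dropWhile] using ih c
      · simp [List.foldl, bStep, List.dropWhile, foldB_some_eq_foldAlt]

-- ===== VERDICT (by name: the statement is the Claim_ definition above) =====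
theorem count_case_change_spec : Claim_equal_count_case_change := by
  intro s _
  unfold Spec_count_case_change count_case_change count_case_change_alt
  rw [foldA_eq_foldB, foldB_none_eq_false, foldB_false_eq_runs]
  norm_num
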